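-- pv_equiv track=rewrite | github.com/icodecedd/python-academics | code_dump/c_look_gui.py | determineDirection
-- ===== SOURCE A (Python) =====
-- def determineDirection(trackRoute, presentTrack, pastTrack):
--     """this function determines the direction of the graph"""
--
--     #checks if the present and past track is in the list of trackRoute
--     excludeTrack = [presentTrack, pastTrack]
--     for track in excludeTrack:
--         while track in trackRoute:
--             trackRoute.remove(track)
--
--     #splits the requested trackRoute depending on the present track
--     leftRoute, rightRoute = [], []
--     for perTrack in trackRoute:
--         if perTrack < presentTrack:
--            leftRoute.append(perTrack)
--         else:
--            rightRoute.append(perTrack)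
--
--     #checks the direction of the graph whether from leftRoute to rightRoute or vice versa
--     chosenDirection = ""
--     if presentTrack < pastTrack:
--         chosenDirection = "leftRoute"
--     elif presentTrack > pastTrack:
--         chosenDirection = "rightRoute"
--
--     leftRoute.sort(reverse=True) #reverse sort the left list
--     rightRoute.sort()
--
--     return leftRoute, rightRoute, chosenDirection
-- ===== SOURCE B (Python) =====
-- def _split_index(xs, x):
--     """binary search: first index i in ascending xs with xs[i] >= x"""
--     lo, hi = 0, len(xs)
--     while lo < hi:
--         mid = (lo + hi) // 2
--         if xs[mid] < x:
--             lo = mid + 1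
--         else:
--             hi = mid
--     return lo
--
--
-- def determineDirection(trackRoute, presentTrack, pastTrack):
--     """sort the survivors once, then binary-search the pivot to split"""
--     # same observable in-place mutation as the original: drop every
--     # occurrence of presentTrack and pastTrack from trackRoute
--     trackRoute[:] = [x for x in trackRoute
--                      if x != presentTrack and x != pastTrack]
--
--     survivors = sorted(trackRoute)
--     i = _split_index(survivors, presentTrack)
--
--     leftRoute = survivors[:i]
--     leftRoute.reverse()
--     rightRoute = survivors[i:]
--
--     if presentTrack < pastTrack:
--         chosenDirection = "leftRoute"
--     elif presentTrack > pastTrack: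
--         chosenDirection = "rightRoute"
--     else:
--         chosenDirection = ""
--
--     return leftRoute, rightRoute, chosenDirection
-- ===== Notes on version B (the rewrite author's own statement) =====
-- stated objective: alternative
-- what changed: B replaces A's quadratic repeated list.remove loop and two per-half sorts with one list-comprehension filter, a single ascending sort of all survivors, and a binary search for the pivot that splits the sorted list into the two halves (left half reversed).
import Mathlib
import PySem

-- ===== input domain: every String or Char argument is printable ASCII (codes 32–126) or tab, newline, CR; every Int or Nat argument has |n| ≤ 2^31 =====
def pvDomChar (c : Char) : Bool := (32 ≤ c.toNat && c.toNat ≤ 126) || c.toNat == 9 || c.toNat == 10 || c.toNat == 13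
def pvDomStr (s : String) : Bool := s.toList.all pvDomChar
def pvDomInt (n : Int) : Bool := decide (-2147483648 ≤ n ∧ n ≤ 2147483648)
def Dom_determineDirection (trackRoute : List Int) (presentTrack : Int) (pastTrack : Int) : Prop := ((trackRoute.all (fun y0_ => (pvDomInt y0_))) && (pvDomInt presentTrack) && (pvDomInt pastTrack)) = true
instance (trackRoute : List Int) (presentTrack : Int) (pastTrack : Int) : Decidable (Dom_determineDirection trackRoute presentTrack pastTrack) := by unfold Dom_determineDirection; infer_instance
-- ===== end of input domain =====

-- B sorts the survivors once and splits at a binary-searched pivot index instead of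
-- A's repeated in-place remove plus two per-half sorts; both Pythons mutate trackRoute
-- identically, the theorems are about the returned triple.

-- ===== PORT A =====
-- 'while track in trackRoute: trackRoute.remove(track)'
def removeAllLoop (l : List Int) (t : Int) : List Int :=
  if _h : t ∈ l then
    removeAllLoop ((PySem.List.remove? l t).getD l) t
  else l
termination_by l.length
decreasing_by
  rw [PySem.List.remove?_eq_some_erase l t _h, Option.getD_some]
  rw [List.length_erase_of_mem _h]
  have := List.length_pos_of_mem _h
  omega

def determineDirection (trackRoute : List Int) (presentTrack : Int) (pastTrack : Int) : List Int × List Int × String :=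
  let excludeTrack := [presentTrack, pastTrack]
  let trackRoute := excludeTrack.foldl (fun l t => removeAllLoop l t) trackRoute
  let lr := trackRoute.foldl
    (fun (acc : List Int × List Int) perTrack =>
      if perTrack < presentTrack then (acc.1 ++ [perTrack], acc.2)
      else (acc.1, acc.2 ++ [perTrack]))
    ([], [])
  let chosenDirection : String :=
    if presentTrack < pastTrack then "leftRoute"
    else if presentTrack > pastTrack then "rightRoute"
    else ""
  (PySem.List.sorted lr.1 (fun x => x) true, PySem.List.sorted lr.2 (fun x => x) false, chosenDirection)

-- ===== PORT B =====
-- hand-written binary search of Source B: first index i in ascending xs with xs[i] >= x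
def splitIndexGo (xs : List Int) (x : Int) (lo hi : Nat) : Nat :=
  if _h : lo < hi then
    let mid := (lo + hi) / 2
    if xs.getD mid 0 < x then splitIndexGo xs x (mid + 1) hi
    else splitIndexGo xs x lo mid
  else lo
termination_by hi - lo
decreasing_by all_goals omega

def splitIndex (xs : List Int) (x : Int) : Nat := splitIndexGo xs x 0 xs.length

def determineDirection_alt (trackRoute : List Int) (presentTrack : Int) (pastTrack : Int) : List Int × List Int × String :=
  let trackRoute := trackRoute.filter (fun x => x != presentTrack && x != pastTrack)
  let survivors := PySem.List.sorted trackRoute (fun x => x) false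
  let i := splitIndex survivors presentTrack
  let leftRoute := (PySem.List.slice survivors none (some (i : Int))).reverse
  let rightRoute := PySem.List.slice survivors (some (i : Int)) none
  let chosenDirection : String :=
    if presentTrack < pastTrack then "leftRoute"
    else if presentTrack > pastTrack then "rightRoute"
    else ""
  (leftRoute, rightRoute, chosenDirection)

-- ===== PRECONDITION & SPEC =====
def Spec_determineDirection (trackRoute : List Int) (presentTrack : Int) (pastTrack : Int) (out : List Int × List Int × String) : Prop := out = determineDirection_alt trackRoute presentTrack pastTrack
instance (trackRoute : List Int) (presentTrack : Int) (pastTrack : Int) (out : List Int × List Int × String) : Decidable (Spec_determineDirection trackRoute presentTrack pastTrack out) := by unfold Spec_determineDirection; infer_instance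

-- ===== CLAIM (what is proved, stated in full; the proofs are below) =====
def Claim_equal_determineDirection : Prop := ∀ (trackRoute : List Int) (presentTrack : Int) (pastTrack : Int), Dom_determineDirection trackRoute presentTrack pastTrack → Spec_determineDirection trackRoute presentTrack pastTrack (determineDirection trackRoute presentTrack pastTrack)

-- ===== LEMMAS AND PROOFS =====

theorem filter_erase_ne (l : List Int) (t : Int) :
    (l.erase t).filter (fun x => x != t) = l.filter (fun x => x != t) := by
  induction l with
  | nil => rfl
  | cons a l ih =>
    by_cases h : a = t
    · subst h; simp [List.erase_cons_head]
    · rw [List.erase_cons_tail (by simp [h])]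
      simp [h, ih]

theorem removeAllLoop_eq_filter (l : List Int) (t : Int) :
    removeAllLoop l t = l.filter (fun x => x != t) := by
  induction l using removeAllLoop.induct t with
  | case1 l h ih =>
    rw [removeAllLoop, dif_pos h]
    rw [PySem.List.remove?_eq_some_erase l t h, Option.getD_some] at ih ⊢
    rw [ih, filter_erase_ne]
  | case2 l h =>
    rw [removeAllLoop, dif_neg h]
    symm
    apply List.filter_eq_self.2
    intro a ha
    simp
    rintro rfl
    exact h ha

theorem getD_mono (xs : List Int) (hs : List.Pairwise (· ≤ ·) xs)
    (a b : Nat) (hab : a ≤ b) (hb : b < xs.length) :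
    xs.getD a 0 ≤ xs.getD b 0 := by
  rcases eq_or_lt_of_le hab with rfl | h
  · exact le_refl _
  · rw [List.getD_eq_getElem _ _ (by omega), List.getD_eq_getElem _ _ hb]
    exact List.pairwise_iff_getElem.mp hs a b (by omega) hb h

theorem splitIndexGo_spec_aux (xs : List Int) (x : Int)
    (hsorted : List.Pairwise (· ≤ ·) xs) (n : Nat) :
    ∀ lo hi, hi - lo ≤ n → hi ≤ xs.length → lo ≤ hi →
    (∀ j, j < lo → xs.getD j 0 < x) →
    (∀ j, hi ≤ j → j < xs.length → x ≤ xs.getD j 0) →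
    splitIndexGo xs x lo hi ≤ xs.length ∧
      (∀ j, j < splitIndexGo xs x lo hi → xs.getD j 0 < x) ∧
      (∀ j, splitIndexGo xs x lo hi ≤ j → j < xs.length → x ≤ xs.getD j 0) := by
  induction n with
  | zero =>
    intro lo hi hn hhi hlohi hlow hhigh
    rw [splitIndexGo, dif_neg (by omega)]
    exact ⟨by omega, hlow, fun j hj => hhigh j (by omega)⟩
  | succ n ih =>
    intro lo hi hn hhi hlohi hlow hhigh
    rw [splitIndexGo]
    by_cases h : lo < hi
    · rw [dif_pos h]
      by_cases hmid : xs.getD ((lo + hi) / 2) 0 < x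
      · simp only [if_pos hmid]
        apply ih _ _ (by omega) hhi (by omega) _ hhigh
        intro j hj
        exact lt_of_le_of_lt (getD_mono xs hsorted j ((lo + hi) / 2) (by omega) (by omega)) hmid
      · simp only [if_neg hmid]
        apply ih _ _ (by omega) (by omega) (by omega) hlow
        intro j hj hjlen
        exact le_trans (not_lt.mp hmid) (getD_mono xs hsorted ((lo + hi) / 2) j (by omega) hjlen)
    · rw [dif_neg h]
      exact ⟨by omega, hlow, fun j hj => hhigh j (by omega)⟩

theorem splitIndex_spec (xs : List Int) (x : Int)
    (hsorted : List.Pairwise (· ≤ ·) xs) :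
    splitIndex xs x ≤ xs.length ∧
      (∀ j, j < splitIndex xs x → xs.getD j 0 < x) ∧
      (∀ j, splitIndex xs x ≤ j → j < xs.length → x ≤ xs.getD j 0) := by
  exact splitIndexGo_spec_aux xs x hsorted xs.length 0 xs.length (by omega) (le_refl _)
    (by omega) (by omega) (fun j hj hjl => by omega)

theorem take_drop_filter_of_split (s : List Int) (p : Int) (i : Nat)
    (hi : i ≤ s.length)
    (hlow : ∀ j, j < i → s.getD j 0 < p)
    (hhigh : ∀ j, i ≤ j → j < s.length → p ≤ s.getD j 0) :
    s.take i = s.filter (fun x => decide (x < p)) ∧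
      s.drop i = s.filter (fun x => !decide (x < p)) := by
  have htake : ∀ x ∈ s.take i, x < p := by
    intro x hx
    obtain ⟨j, hj, rfl⟩ := List.mem_iff_getElem.mp hx
    rw [List.getElem_take] at *
    have := hlow j (by simp at hj; omega)
    rwa [List.getD_eq_getElem _ _ (by simp at hj; omega)] at this
  have hdrop : ∀ x ∈ s.drop i, p ≤ x := by
    intro x hx
    obtain ⟨j, hj, rfl⟩ := List.mem_iff_getElem.mp hx
    rw [List.getElem_drop] at *
    have := hhigh (i + j) (by omega) (by simp at hj; omega)
    rwa [List.getD_eq_getElem _ _ (by simp at hj; omega)] at this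
  constructor
  · conv_rhs => rw [← List.take_append_drop i s]
    rw [List.filter_append]
    rw [List.filter_eq_self.mpr (fun a ha => by simpa using htake a ha)]
    rw [List.filter_eq_nil_iff.mpr (fun a ha => by simpa using hdrop a ha), List.append_nil]
  · conv_rhs => rw [← List.take_append_drop i s]
    rw [List.filter_append]
    rw [List.filter_eq_nil_iff.mpr (fun a ha => by simpa using htake a ha)]
    rw [List.filter_eq_self.mpr (fun a ha => by simpa using hdrop a ha), List.nil_append]

theorem sorted_rev_id_eq_of_perm_of_pairwise_ge (xs ys : List Int)
    (hperm : ys.Perm xs) (hpw : List.Pairwise (fun a b => b ≤ a) ys) :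
    PySem.List.sorted xs (fun x => x) true = ys := by
  have h1 : (PySem.List.sorted xs (fun x => x) true).reverse.Perm ys.reverse := by
    refine List.Perm.trans (List.reverse_perm _) ?_
    exact ((PySem.List.sorted_perm xs (fun x => x) true).trans hperm.symm).trans
      (List.reverse_perm ys).symm
  have h2 := PySem.List.eq_of_perm_of_pairwise_le_of_injective (fun x : Int => x)
    (fun a b h => h) h1 ?_ ?_
  · have := congrArg List.reverse h2
    simpa using this
  · rw [List.pairwise_reverse]
    exact PySem.List.sorted_pairwise_rev xs (fun x => x)
  · rw [List.pairwise_reverse]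
    exact hpw

theorem foldl_split (l : List Int) (p : Int) (a b : List Int) :
    l.foldl (fun (acc : List Int × List Int) x =>
        if x < p then (acc.1 ++ [x], acc.2) else (acc.1, acc.2 ++ [x])) (a, b)
      = (a ++ l.filter (fun x => decide (x < p)), b ++ l.filter (fun x => !decide (x < p))) := by
  induction l generalizing a b with
  | nil => simp
  | cons x l ih =>
    by_cases h : x < p
    · simp [List.foldl_cons, h, ih]
    · simp [List.foldl_cons, h, ih]

-- ===== VERDICT (by name: the statement is the Claim_ definition above) =====
theorem determineDirection_spec : Claim_equal_determineDirection := by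
  intro tr p q _hdom
  unfold Spec_determineDirection determineDirection determineDirection_alt
  simp only [List.foldl_cons, List.foldl_nil]
  rw [removeAllLoop_eq_filter, removeAllLoop_eq_filter, List.filter_filter]
  rw [List.filter_congr (fun x _ => by rw [Bool.and_comm])]
  set tr2 := tr.filter (fun x => x != p && x != q) with htr2
  set s := PySem.List.sorted tr2 (fun x => x) false with hs
  have hpw : List.Pairwise (· ≤ ·) s := PySem.List.sorted_pairwise tr2 (fun x => x)
  obtain ⟨hile, hlow, hhigh⟩ := splitIndex_spec s p hpw
  obtain ⟨htake, hdrop⟩ := take_drop_filter_of_split s p (splitIndex s p) hile hlow hhigh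
  rw [foldl_split]
  simp only [List.nil_append]
  rw [PySem.List.slice_to_natCast, PySem.List.slice_from_natCast, htake, hdrop]
  have hperm : s.Perm tr2 := PySem.List.sorted_perm tr2 (fun x => x) false
  refine Prod.ext ?_ (Prod.ext ?_ rfl)
  · show PySem.List.sorted (tr2.filter fun x => decide (x < p)) (fun x => x) true
      = (s.filter fun x => decide (x < p)).reverse
    apply sorted_rev_id_eq_of_perm_of_pairwise_ge
    · exact (List.reverse_perm _).trans (hperm.filter _)
    · rw [List.pairwise_reverse]
      exact hpw.filter _
  · show PySem.List.sorted (tr2.filter fun x => !decide (x < p)) (fun x => x) false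
      = s.filter fun x => !decide (x < p)
    apply PySem.List.sorted_id_eq_of_perm_of_pairwise
    · exact hperm.filter _
    · exact hpw.filter _
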